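-- pv_equiv track=rewrite | github.com/jacobptnguyen/ticTacConnect | ticTacConnect.py | isCorrectFormat
-- ===== SOURCE A (Python) =====
-- def isCorrectFormat(userInput):
--     userInput = userInput.strip()
--     for c in userInput:
--         try:
--             int(c)
--         except:
--             if c == " ":
--                 continue
--             return False
--     return isTwoNums(userInput)
--
-- def isTwoNums(userInput):
--     count = 0
--     prevCharWasNum = True
--     for c in userInput:
--         try:
--             int(c)
--             prevCharWasNum = True
--         except:
--             if prevCharWasNum:
--                 count += 1
--                 prevCharWasNum = False
--     return count == 1
-- ===== SOURCE B (Python) =====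
-- def isCorrectFormat(userInput):
--     s = userInput.strip()
--     for c in s:
--         if not ("0" <= c <= "9" or c == " "):
--             return False
--     return len(s.split()) == 2
-- ===== Notes on version B (the rewrite author's own statement) =====
-- stated objective: simpler
-- what changed: drops the isTwoNums state-machine helper (count/prevCharWasNum flags) in favour of len(s.split()) == 2 on the already-validated stripped string, and replaces the try/except int(c) probe with a direct digit-or-space character test
import Mathlib
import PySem

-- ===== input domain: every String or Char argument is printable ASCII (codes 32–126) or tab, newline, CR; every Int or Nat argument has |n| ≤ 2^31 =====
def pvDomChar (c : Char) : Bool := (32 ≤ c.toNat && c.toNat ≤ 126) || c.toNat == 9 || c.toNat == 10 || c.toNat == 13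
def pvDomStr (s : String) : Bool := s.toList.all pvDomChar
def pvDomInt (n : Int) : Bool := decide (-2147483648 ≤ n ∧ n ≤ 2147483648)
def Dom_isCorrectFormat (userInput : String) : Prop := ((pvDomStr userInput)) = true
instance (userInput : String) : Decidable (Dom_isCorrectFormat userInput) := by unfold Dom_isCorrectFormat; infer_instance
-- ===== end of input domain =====

-- B drops A's isTwoNums state-machine helper in favour of counting the tokens of
-- s.split() on the already-validated stripped string (objective: simpler).

-- ===== PORT A =====
-- for c in userInput: try: int(c) except: if c == " ": continue; return False
def pvCheckChars : List Char → Bool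
  | [] => true
  | c :: rest =>
      match PySem.Int.ofChars? [c] with
      | some _ => pvCheckChars rest
      | none => if c = ' ' then pvCheckChars rest else false

-- the loop of isTwoNums: state (count, prevCharWasNum)
def pvIsTwoNumsLoop : List Char → Int → Bool → Int
  | [], count, _ => count
  | c :: rest, count, prev =>
      match PySem.Int.ofChars? [c] with
      | some _ => pvIsTwoNumsLoop rest count true
      | none =>
          if prev then pvIsTwoNumsLoop rest (count + 1) false
          else pvIsTwoNumsLoop rest count prev

def isTwoNums (userInput : String) : Bool :=
  pvIsTwoNumsLoop userInput.toList 0 true == 1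

def isCorrectFormat (userInput : String) : Bool :=
  let s := PySem.Str.strip userInput
  if pvCheckChars s.toList then isTwoNums s else false

-- ===== PORT B =====
def pvAllowed (c : Char) : Bool := (decide ('0' ≤ c) && decide (c ≤ '9')) || decide (c = ' ')

-- for c in s: if not ("0" <= c <= "9" or c == " "): return False
def pvScan : List Char → Bool
  | [] => true
  | c :: rest => if !pvAllowed c then false else pvScan rest

def isCorrectFormat_alt (userInput : String) : Bool :=
  let s := PySem.Str.strip userInput
  if pvScan s.toList then (PySem.Str.split₀ s).length == 2 else false

-- ===== PRECONDITION & SPEC =====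
def Spec_isCorrectFormat (userInput : String) (out : Bool) : Prop := out = isCorrectFormat_alt userInput
instance (userInput : String) (out : Bool) : Decidable (Spec_isCorrectFormat userInput out) := by unfold Spec_isCorrectFormat; infer_instance

-- ===== CLAIM (what is proved, stated in full; the proofs are below) =====
def Claim_equal_isCorrectFormat : Prop := ∀ (userInput : String), Dom_isCorrectFormat userInput → Spec_isCorrectFormat userInput (isCorrectFormat userInput)

-- ===== LEMMAS AND PROOFS =====

-- int(c) succeeds exactly on '0'..'9' for every char below code 127 (checked by enumeration)
theorem pv_int_singleton (c : Char) (h : c.toNat < 127) :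
    (PySem.Int.ofChars? [c]).isSome = (decide ('0' ≤ c) && decide (c ≤ '9')) := by
  have h2 : ∀ n : Nat, n < 127 →
      (PySem.Int.ofChars? [Char.ofNat n]).isSome =
        (decide ('0' ≤ Char.ofNat n) && decide (Char.ofNat n ≤ '9')) := by decide
  have := h2 c.toNat h
  rwa [Char.ofNat_toNat] at this

theorem pv_digit_not_space (c : Char) (hd : (decide ('0' ≤ c) && decide (c ≤ '9')) = true) :
    PySem.Chars.isspace c = false := by
  simp only [Bool.and_eq_true, decide_eq_true_eq, Char.le_def, UInt32.le_iff_toNat_le] at hd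
  have h1 : 48 ≤ c.toNat := hd.1
  have h2 : c.toNat ≤ 57 := hd.2
  simp only [PySem.Chars.isspace, Char.toNat] at *
  simp only [decide_eq_false_iff_not, Bool.or_eq_false_iff, Bool.and_eq_false_iff]
  omega

-- A's validation loop and B's scan agree character by character
theorem pv_check_eq_scan (L : List Char) (h : ∀ c ∈ L, c.toNat < 127) :
    pvCheckChars L = pvScan L := by
  induction L with
  | nil => rfl
  | cons c rest ih =>
    have hc := pv_int_singleton c (h c (by simp))
    have ih' := ih (fun x hx => h x (by simp [hx]))
    simp only [pvCheckChars, pvScan, pvAllowed]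
    rcases hm : PySem.Int.ofChars? [c] with _ | v
    · rw [hm] at hc
      simp only [Option.isSome_none] at hc
      by_cases hsp : c = ' '
      · simp [hsp, ih']
      · simp [hsp, ← hc]
    · rw [hm] at hc
      simp only [Option.isSome_some] at hc
      simp [← hc, ih']

theorem pv_scan_all (L : List Char) (h : pvScan L = true) : ∀ c ∈ L, pvAllowed c = true := by
  induction L with
  | nil => simp
  | cons c rest ih =>
    rcases (by simpa [pvScan] using h : pvAllowed c = true ∧ pvScan rest = true) with ⟨h1, h2⟩
    intro x hx
    rcases List.mem_cons.mp hx with rfl | hx'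
    · exact h1
    · exact ih h2 x hx' 

-- pvT L e = number of tokens split₀.go still emits (e = "cur is empty")
def pvT : List Char → Bool → Nat
  | [], e => if e then 0 else 1
  | c :: r, e =>
      if PySem.Chars.isspace c then (if e then pvT r true else 1 + pvT r true)
      else pvT r false

-- pvS L prev = number of count-increments the isTwoNums loop still makes
def pvS : List Char → Bool → Nat
  | [], _ => 0
  | c :: r, prev =>
      if (decide ('0' ≤ c) && decide (c ≤ '9')) then pvS r true
      else (if prev then 1 + pvS r false else pvS r false)

theorem pv_go_length (L : List Char) (cur : List Char) (acc : List (List Char)) :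
    (PySem.Chars.split₀.go L cur acc).length = acc.length + pvT L cur.isEmpty := by
  induction L generalizing cur acc with
  | nil =>
    simp only [PySem.Chars.split₀.go, pvT]
    by_cases he : cur.isEmpty <;> simp [he]
  | cons c r ih =>
    simp only [PySem.Chars.split₀.go, pvT]
    by_cases hs : PySem.Chars.isspace c
    · by_cases he : cur.isEmpty <;> simp [hs, he, ih] <;> omega
    · simp [hs, ih]

theorem pv_twoLoop_eq (L : List Char) (count : Int) (prev : Bool)
    (h : ∀ c ∈ L, c.toNat < 127) :
    pvIsTwoNumsLoop L count prev = count + (pvS L prev : Int) := by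
  induction L generalizing count prev with
  | nil => simp [pvIsTwoNumsLoop, pvS]
  | cons c r ih =>
    have hc := pv_int_singleton c (h c (by simp))
    have ih' := fun cnt pv => ih cnt pv (fun x hx => h x (by simp [hx]))
    simp only [pvIsTwoNumsLoop, pvS]
    rcases hm : PySem.Int.ofChars? [c] with _ | v <;> rw [hm] at hc
    · simp only [Option.isSome_none] at hc
      rw [← hc]
      cases prev
      · simp [ih']
      · simp [ih']; ring
    · simp only [Option.isSome_some] at hc
      rw [← hc]
      simp [ih']

-- key invariant: on digit/space strings whose last char is a digit,
-- tokens still to emit = space-runs still to count, plus one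
theorem pv_TS (L : List Char) (hall : ∀ c ∈ L, pvAllowed c = true)
    (hlast : ∀ c, L.getLast? = some c → (decide ('0' ≤ c) && decide (c ≤ '9')) = true) :
    pvT L false = pvS L true + 1 ∧ (L ≠ [] → pvT L true = pvS L false + 1) := by
  induction L with
  | nil => simp [pvT, pvS]
  | cons c r ih =>
    have hc := hall c (by simp)
    have hall' : ∀ x ∈ r, pvAllowed x = true := fun x hx => hall x (by simp [hx])
    simp only [pvAllowed, Bool.or_eq_true, decide_eq_true_eq] at hc
    rcases hc with hd | hsp
    · -- c is a digit
      have hns := pv_digit_not_space c hd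
      rcases hr : r with _ | ⟨c2, r2⟩
      · simp [pvT, pvS, hns, hd]
      · rw [← hr]
        have hlast' : ∀ x, r.getLast? = some x → (decide ('0' ≤ x) && decide (x ≤ '9')) = true := by
          intro x hx
          apply hlast
          rw [hr, List.getLast?_cons_cons, ← hr]
          exact hx
        have ihh := (ih hall' hlast').1
        refine ⟨?_, fun _ => ?_⟩ <;> simp [pvT, pvS, hns, hd, ihh]
    · -- c = ' '
      subst hsp
      have hns : PySem.Chars.isspace ' ' = true := by decide
      have hnd : (decide ('0' ≤ ' ') && decide (' ' ≤ '9')) = false := by decide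
      have hr : r ≠ [] := by
        intro h
        subst h
        have := hlast ' ' (by simp)
        simp at this
      obtain ⟨y, r', hry⟩ := List.exists_cons_of_ne_nil hr
      have hlast' : ∀ x, r.getLast? = some x → (decide ('0' ≤ x) && decide (x ≤ '9')) = true := by
        intro x hx
        apply hlast
        rw [hry, List.getLast?_cons_cons, ← hry]
        exact hx
      have ihh := (ih hall' hlast').2 hr
      refine ⟨?_, fun _ => ?_⟩ <;> (simp [pvT, pvS, hns, ihh]; try omega)

-- strip leaves no leading or trailing whitespace, and only chars of the input
theorem pv_strip_last (x : List Char) (c : Char) (h : (PySem.Chars.strip x).getLast? = some c) :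
    PySem.Chars.isspace c = false := by
  simp only [PySem.Chars.strip, PySem.Chars.rstrip, PySem.Chars.lstrip, List.getLast?_reverse] at h
  have := List.head?_dropWhile_not PySem.Chars.isspace ((List.dropWhile PySem.Chars.isspace x).reverse)
  rw [h] at this
  exact this

theorem pv_strip_head (x : List Char) (c : Char) (h : (PySem.Chars.strip x).head? = some c) :
    PySem.Chars.isspace c = false := by
  simp only [PySem.Chars.strip, PySem.Chars.rstrip, PySem.Chars.lstrip, List.head?_reverse] at h
  set y := (List.dropWhile PySem.Chars.isspace x).reverse with hy
  obtain ⟨t, ht⟩ := List.dropWhile_suffix (l := y) PySem.Chars.isspace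
  have hy' : y.getLast? = some c := by
    conv_lhs => rw [← ht]
    rw [List.getLast?_append, h]
    rfl
  rw [hy, List.getLast?_reverse] at hy'
  have := List.head?_dropWhile_not PySem.Chars.isspace x
  rw [hy'] at this
  exact this

theorem pv_strip_mem (x : List Char) (c : Char) (h : c ∈ PySem.Chars.strip x) : c ∈ x := by
  simp only [PySem.Chars.strip, PySem.Chars.rstrip, PySem.Chars.lstrip, List.mem_reverse] at h
  have h1 := (List.dropWhile_sublist (p := PySem.Chars.isspace)).mem h
  rw [List.mem_reverse] at h1
  exact (List.dropWhile_sublist (p := PySem.Chars.isspace)).mem h1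

theorem pv_beq_shift (n : Nat) : (((0 : Int) + (n : Int)) == (1 : Int)) = ((n + 1) == 2) := by
  by_cases h : n = 1 <;> simp [h]

-- ===== VERDICT (by name: the statement is the Claim_ definition above) =====
theorem isCorrectFormat_spec : Claim_equal_isCorrectFormat := by
  intro u hdom
  unfold Spec_isCorrectFormat isCorrectFormat isCorrectFormat_alt isTwoNums
  simp only [PySem.Str.toList_strip]
  have hdomL : ∀ c ∈ PySem.Chars.strip u.toList, c.toNat < 127 := by
    intro c hc
    have hcu : c ∈ u.toList := pv_strip_mem _ _ hc
    have hall : ∀ x ∈ u.toList, pvDomChar x = true := by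
      simpa [Dom_isCorrectFormat, pvDomStr, List.all_eq_true] using hdom
    have := hall c hcu
    simp only [pvDomChar, Bool.or_eq_true, Bool.and_eq_true, decide_eq_true_eq, beq_iff_eq] at this
    omega
  rw [pv_check_eq_scan _ hdomL]
  by_cases hscan : pvScan (PySem.Chars.strip u.toList) = true
  · simp only [hscan, if_true]
    have hsplen : (PySem.Str.split₀ (PySem.Str.strip u)).length
        = pvT (PySem.Chars.strip u.toList) true := by
      rw [← List.length_map (f := String.toList), PySem.Str.split₀_map_toList,
        PySem.Str.toList_strip]
      rw [show PySem.Chars.split₀ (PySem.Chars.strip u.toList)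
            = PySem.Chars.split₀.go (PySem.Chars.strip u.toList) [] [] from rfl, pv_go_length]
      simp
    rw [hsplen, pv_twoLoop_eq _ 0 true hdomL]
    have hall := pv_scan_all _ hscan
    rcases hLc : PySem.Chars.strip u.toList with _ | ⟨c, r⟩
    · simp [pvS, pvT]
    · rw [hLc] at hall
      have hhead : PySem.Chars.isspace c = false :=
        pv_strip_head u.toList c (by rw [hLc]; rfl)
      have hd : (decide ('0' ≤ c) && decide (c ≤ '9')) = true := by
        have hca := hall c (by simp)
        simp only [pvAllowed, Bool.or_eq_true, decide_eq_true_eq] at hca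
        rcases hca with h | rfl
        · exact h
        · exact absurd hhead (by decide)
      rcases hr : r with _ | ⟨c2, r2⟩
      · simp [pvS, pvT, hd, hhead]
    -- r ≠ []: use the invariant on r
      · rw [← hr]
        have hrne : r ≠ [] := by rw [hr]; simp
        have hlast : ∀ x, r.getLast? = some x →
            (decide ('0' ≤ x) && decide (x ≤ '9')) = true := by
          intro x hx
          have hlx : (PySem.Chars.strip u.toList).getLast? = some x := by
            rw [hLc, hr, List.getLast?_cons_cons, ← hr]
            exact hx
          have hsx := pv_strip_last u.toList x hlx
          have hxmem : x ∈ r := List.mem_of_getLast? hx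
          have hxa := hall x (by simp [hxmem])
          simp only [pvAllowed, Bool.or_eq_true, decide_eq_true_eq] at hxa
          rcases hxa with h | rfl
          · exact h
          · exact absurd hsx (by decide)
        have hTS := (pv_TS r (fun x hx => hall x (by simp [hx])) hlast).1
        have hSL : pvS (c :: r) true = pvS r true := by simp [pvS, hd]
        have hTL : pvT (c :: r) true = pvT r false := by simp [pvT, hhead]
        rw [hSL, hTL, hTS]
        exact pv_beq_shift _
  · simp [hscan]
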